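-- pv_equiv track=rewrite | github.com/isrusin/lab-tools | get_stat.py | make_raw_table_stub
-- ===== SOURCE A (Python) =====
-- def make_raw_table_stub(columns, rows, spacer="_",
--                         lab_width=6, cell_width=10):
--     cell = "{{%s{spacer}{abbr}:>%d}}"
--     title = [" " * lab_width]
--     row_stub = ["{name:<%d}" % lab_width]
--     empty = ["-" * lab_width]
--     for name, abbr in columns:
--         title.append(name.center(cell_width))
--         row_stub.append(cell % (abbr, cell_width))
--         empty.append("-" * cell_width)
--     empty = "+".join(empty) + "\n"
--     row_stub = "|".join(row_stub) + "\n"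
--     table = ["|".join(title), "\n", empty]
--     for row in rows:
--         if row:
--             name, abbr = row
--             table.append(row_stub.format(
--                 name=name, abbr=abbr, spacer=spacer
--             ))
--         else:
--             table.append(empty)
--     return "".join(table)
-- ===== SOURCE B (Python) =====
-- def make_raw_table_stub(columns, rows, spacer="_",
--                         lab_width=6, cell_width=10):
--     # Direct construction: build each output line literally instead of
--     # preparing reusable meta-format templates and running str.format on them.
--     header = "|".join([" " * lab_width] +
--                       [name.center(cell_width) for name, _ in columns])
--     sep = "+".join(["-" * lab_width] +
--                    ["-" * cell_width for _ in columns]) + "\n"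
--     parts = [header, "\n", sep]
--     for row in rows:
--         if row:
--             name, abbr = row
--             cells = [name.ljust(lab_width)]
--             for _, col_abbr in columns:
--                 cells.append("{" + col_abbr + spacer + abbr
--                              + ":>" + str(cell_width) + "}")
--             parts.append("|".join(cells) + "\n")
--         else:
--             parts.append(sep)
--     return "".join(parts)
-- ===== Notes on version B (the rewrite author's own statement) =====
-- stated objective: simpler
-- what changed: B drops A's reusable meta-format templates (the %-built cell/row_stub strings and the str.format pass over them) and instead builds the header, separator and each row line directly by concatenating the literal pieces.
import Mathlib
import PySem

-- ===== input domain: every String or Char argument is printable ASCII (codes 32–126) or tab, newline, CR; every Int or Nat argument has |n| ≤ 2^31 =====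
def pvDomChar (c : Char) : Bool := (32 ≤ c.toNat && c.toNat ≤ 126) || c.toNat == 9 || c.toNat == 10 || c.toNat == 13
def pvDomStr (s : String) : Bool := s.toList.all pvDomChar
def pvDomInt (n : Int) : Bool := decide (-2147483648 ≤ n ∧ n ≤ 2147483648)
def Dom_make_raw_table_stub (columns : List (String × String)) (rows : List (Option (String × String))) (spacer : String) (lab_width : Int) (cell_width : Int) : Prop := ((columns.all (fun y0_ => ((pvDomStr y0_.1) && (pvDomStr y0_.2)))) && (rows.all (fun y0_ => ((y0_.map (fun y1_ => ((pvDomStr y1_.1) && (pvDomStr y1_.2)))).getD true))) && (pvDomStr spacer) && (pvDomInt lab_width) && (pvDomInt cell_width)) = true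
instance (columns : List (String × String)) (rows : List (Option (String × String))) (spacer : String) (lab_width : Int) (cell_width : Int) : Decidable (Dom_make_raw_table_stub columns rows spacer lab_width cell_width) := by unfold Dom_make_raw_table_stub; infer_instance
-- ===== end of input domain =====

-- B drops A's reusable meta-format templates and str.format pass and builds every output line
-- directly (objective: simpler).  Equality is over the return value only (no argument is mutated).

-- shared string primitives (exact ports of the Python string methods both sides use)
-- "c" * n  (Python string repetition)
def pvRep (c : Char) (n : Int) : List Char := List.replicate n.toNat c

-- s.ljust(w)  for a nonnegative width w (Python pads with spaces on the right)
def pvLjust (s : List Char) (w : Nat) : List Char := s ++ List.replicate (w - s.length) ' '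

-- s.center(w)  (CPython: marg = w - len; left = marg/2 + (marg & w & 1))
def pvCenter (s : List Char) (w : Int) : List Char :=
  if w ≤ (s.length : Int) then s
  else
    let W := w.toNat
    let marg := W - s.length
    let left := marg / 2 + (if marg % 2 = 1 ∧ W % 2 = 1 then 1 else 0)
    List.replicate left ' ' ++ s ++ List.replicate (marg - left) ' '

-- ===== PORT A =====
-- '"{{%s{spacer}{abbr}:>%d}}" % (abbr, cell_width)' hand-ported as literal concatenation (exact)
def pvPct (abbr : List Char) (cw : Int) : List Char :=
  '{' :: '{' :: (abbr ++ ("{spacer}{abbr}:>".toList ++ (PySem.Int.toChars cw ++ ['}', '}'])))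

-- one replacement field of str.format: exact for the fields A's template contains
-- ({name:<W} with W ≥ 0 decimal, {abbr}, {spacer}); other fields never occur under Pre_
def pvFmtStep (a : Nat) (c : Char) : Nat := a * 10 + (c.toNat - 48)

def pvApplyField (field nm ab sp : List Char) : List Char :=
  let key := field.takeWhile (· ≠ ':')
  let spec := (field.dropWhile (· ≠ ':')).drop 1
  let v : List Char :=
    if key = "name".toList then nm
    else if key = "abbr".toList then ab
    else if key = "spacer".toList then sp
    else []
  match spec with
  | '<' :: ds => pvLjust v (ds.foldl pvFmtStep 0)
  | _ => v

-- row_stub.format(name=…, abbr=…, spacer=…): hand-port of CPython's format-string scanner,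
-- exact on templates with '{{' '}}' escapes and brace-free fields (all that occurs under Pre_);
-- where CPython raises ValueError (lone '{'/'}') this returns some value, outside Pre_.
def pvFormat (nm ab sp : List Char) : List Char → List Char
  | [] => []
  | '{' :: '{' :: r => '{' :: pvFormat nm ab sp r
  | '{' :: r =>
      pvApplyField (r.takeWhile (· ≠ '}')) nm ab sp ++
        pvFormat nm ab sp ((r.dropWhile (· ≠ '}')).drop 1)
  | '}' :: '}' :: r => '}' :: pvFormat nm ab sp r
  | '}' :: r => pvFormat nm ab sp r
  | c :: r => c :: pvFormat nm ab sp r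
termination_by cs => cs.length
decreasing_by
  all_goals simp
  all_goals try omega
  have := List.length_dropWhile_le (fun x => !decide (x = '}')) r
  have h2 : ((r.dropWhile fun x => !decide (x = '}')).drop 1).length ≤ r.length := by
    simp only [List.length_drop]; omega
  omega

def pvRowOutA (empty sp rowStub : List Char) (r : Option (String × String)) : List Char :=
  match r with
  | some (nm, ab) => pvFormat nm.toList ab.toList sp rowStub
  | none => empty

def make_raw_table_stub (columns : List (String × String)) (rows : List (Option (String × String))) (spacer : String) (lab_width : Int) (cell_width : Int) : String :=
  let title0 : List (List Char) := [pvRep ' ' lab_width]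
  -- '"{name:<%d}" % lab_width' hand-ported as literal concatenation (exact)
  let rowStub0 : List (List Char) := ['{' :: ("name:<".toList ++ (PySem.Int.toChars lab_width ++ ['}']))]
  let empty0 : List (List Char) := [pvRep '-' lab_width]
  let acc := columns.foldl
    (fun (acc : List (List Char) × List (List Char) × List (List Char)) nc =>
      (acc.1 ++ [pvCenter nc.1.toList cell_width],
       acc.2.1 ++ [pvPct nc.2.toList cell_width],
       acc.2.2 ++ [pvRep '-' cell_width]))
    (title0, rowStub0, empty0)
  let empty := PySem.Chars.join "+".toList acc.2.2 ++ ['\n']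
  let rowStub := PySem.Chars.join "|".toList acc.2.1 ++ ['\n']
  let table0 : List (List Char) := [PySem.Chars.join "|".toList acc.1, ['\n'], empty]
  let table := rows.foldl (fun t r => t ++ [pvRowOutA empty spacer.toList rowStub r]) table0
  String.ofList (PySem.Chars.join [] table)

-- ===== PORT B =====
-- '"{" + col_abbr + spacer + abbr + ":>" + str(cell_width) + "}"'
def pvCellB (colAbbr sp ab : List Char) (cw : Int) : List Char :=
  '{' :: (colAbbr ++ (sp ++ (ab ++ (':' :: '>' :: (PySem.Int.toChars cw ++ ['}'])))))

def pvRowOutB (columns : List (String × String)) (sep sp : List Char) (lab_width cell_width : Int) (r : Option (String × String)) : List Char :=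
  match r with
  | some (nm, ab) =>
      PySem.Chars.join "|".toList
        (pvLjust nm.toList lab_width.toNat ::
          columns.map (fun nc => pvCellB nc.2.toList sp ab.toList cell_width)) ++ ['\n']
  | none => sep

def make_raw_table_stub_alt (columns : List (String × String)) (rows : List (Option (String × String))) (spacer : String) (lab_width : Int) (cell_width : Int) : String :=
  let header := PySem.Chars.join "|".toList
    (pvRep ' ' lab_width :: columns.map (fun nc => pvCenter nc.1.toList cell_width))
  let sep := PySem.Chars.join "+".toList
    (pvRep '-' lab_width :: columns.map (fun _ => pvRep '-' cell_width)) ++ ['\n']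
  let parts := rows.foldl
    (fun p r => p ++ [pvRowOutB columns sep spacer.toList lab_width cell_width r])
    [header, ['\n'], sep]
  String.ofList (PySem.Chars.join [] parts)

-- ===== PRECONDITION & SPEC =====
-- Pre_ excludes the inputs on which row_stub.format runs (some row truthy) and misbehaves on
-- A's template: with a negative lab_width or an unbalanced '{'/'}' in a column abbreviation it
-- raises ValueError/KeyError, and with doubled braces in an abbreviation it silently collapses
-- '{{' to '{' — an artefact of embedding the raw abbreviation in a format template, which B
-- (keeping the abbreviation verbatim) defensibly does not reproduce.
def Pre_make_raw_table_stub (columns : List (String × String)) (rows : List (Option (String × String))) (spacer : String) (lab_width : Int) (cell_width : Int) : Prop :=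
  (∀ r ∈ rows, r = none) ∨
    (0 ≤ lab_width ∧ ∀ c ∈ columns, '{' ∉ c.2.toList ∧ '}' ∉ c.2.toList)
instance (columns : List (String × String)) (rows : List (Option (String × String))) (spacer : String) (lab_width : Int) (cell_width : Int) : Decidable (Pre_make_raw_table_stub columns rows spacer lab_width cell_width) := by unfold Pre_make_raw_table_stub; infer_instance

def pvWitness_make_raw_table_stub : (List (String × String)) × (List (Option (String × String))) × String × Int × Int :=
  ([("Alpha", "a"), ("BB", "b")], [some ("r1", "x"), none, some ("r2", "y")], "_", 6, 10)

def Spec_make_raw_table_stub (columns : List (String × String)) (rows : List (Option (String × String))) (spacer : String) (lab_width : Int) (cell_width : Int) (out : String) : Prop := out = make_raw_table_stub_alt columns rows spacer lab_width cell_width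
instance (columns : List (String × String)) (rows : List (Option (String × String))) (spacer : String) (lab_width : Int) (cell_width : Int) (out : String) : Decidable (Spec_make_raw_table_stub columns rows spacer lab_width cell_width out) := by unfold Spec_make_raw_table_stub; infer_instance

-- ===== CLAIM (what is proved, stated in full; the proofs are below) =====
def Claim_equal_make_raw_table_stub : Prop := ∀ (columns : List (String × String)) (rows : List (Option (String × String))) (spacer : String) (lab_width : Int) (cell_width : Int), Dom_make_raw_table_stub columns rows spacer lab_width cell_width → Pre_make_raw_table_stub columns rows spacer lab_width cell_width → Spec_make_raw_table_stub columns rows spacer lab_width cell_width (make_raw_table_stub columns rows spacer lab_width cell_width)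

-- ===== LEMMAS AND PROOFS =====

-- string-literal expansions used by the proofs
theorem lit_name : "name".toList = ['n', 'a', 'm', 'e'] := rfl
theorem lit_abbr : "abbr".toList = ['a', 'b', 'b', 'r'] := rfl
theorem lit_spacer : "spacer".toList = ['s', 'p', 'a', 'c', 'e', 'r'] := rfl
theorem lit_namefld : "name:<".toList = ['n', 'a', 'm', 'e', ':', '<'] := rfl
theorem lit_tmpl : "{spacer}{abbr}:>".toList =
    ['{', 's', 'p', 'a', 'c', 'e', 'r', '}', '{', 'a', 'b', 'b', 'r', '}', ':', '>'] := rfl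
theorem lit_bar : "|".toList = ['|'] := rfl

-- digits of str(n) : values and character set
theorem digitChar_val {d : Nat} (h : d < 10) : (Nat.digitChar d).toNat - 48 = d := by
  interval_cases d <;> decide

theorem digitChar_ok {d : Nat} (h : d < 10) : Nat.digitChar d ≠ '{' ∧ Nat.digitChar d ≠ '}' := by
  interval_cases d <;> decide

theorem tdc_ok : ∀ (f n : Nat) (ds : List Char), (∀ c ∈ ds, c ≠ '{' ∧ c ≠ '}') →
    ∀ c ∈ Nat.toDigitsCore 10 f n ds, c ≠ '{' ∧ c ≠ '}' := by
  intro f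
  induction f with
  | zero => intro n ds hds; simpa [Nat.toDigitsCore] using hds
  | succ f ih =>
    intro n ds hds c hc
    simp only [Nat.toDigitsCore] at hc
    by_cases h0 : n / 10 = 0
    · rw [if_pos h0] at hc
      rcases List.mem_cons.mp hc with h | h
      · exact h ▸ digitChar_ok (Nat.mod_lt _ (by norm_num))
      · exact hds c h
    · rw [if_neg h0] at hc
      refine ih _ _ ?_ c hc
      intro c' hc'
      rcases List.mem_cons.mp hc' with h | h
      · exact h ▸ digitChar_ok (Nat.mod_lt _ (by norm_num))
      · exact hds c' h

theorem toChars_ok (n : Int) : ∀ c ∈ PySem.Int.toChars n, c ≠ '{' ∧ c ≠ '}' := by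
  intro c hc
  unfold PySem.Int.toChars at hc
  split at hc
  · rcases List.mem_cons.mp hc with h | h
    · exact h ▸ by decide
    · exact tdc_ok _ _ [] (by simp) c h
  · exact tdc_ok _ _ [] (by simp) c hc

theorem tdc_parse : ∀ (f n : Nat), 1 ≤ f → n < 10 ^ f → ∀ (ds : List Char) (a : Nat),
    List.foldl pvFmtStep a (Nat.toDigitsCore 10 f n ds)
      = List.foldl pvFmtStep (a * 10 ^ (Nat.toDigitsCore 10 f n []).length + n) ds := by
  intro f
  induction f with
  | zero => omega
  | succ f ih =>
    intro n _ hn ds a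
    simp only [Nat.toDigitsCore]
    by_cases h0 : n / 10 = 0
    · have hn10 : n < 10 := by omega
      rw [if_pos h0, if_pos h0]
      simp only [List.foldl_cons, List.length_cons, List.length_nil]
      have hmod : n % 10 = n := Nat.mod_eq_of_lt hn10
      have hst : pvFmtStep a (Nat.digitChar (n % 10)) = a * 10 ^ 1 + n := by
        rw [hmod]
        simp [pvFmtStep, digitChar_val hn10]
      rw [hst]
    · have hf : 1 ≤ f := by
        by_contra h
        have : f = 0 := by omega
        subst this
        simp at hn
        omega
      have hn' : n / 10 < 10 ^ f := by
        rw [Nat.div_lt_iff_lt_mul (by norm_num)]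
        calc n < 10 ^ (f + 1) := hn
        _ = 10 ^ f * 10 := by ring
      rw [if_neg h0, if_neg h0, ih _ hf hn']
      simp only [List.foldl_cons]
      have hlen : (Nat.toDigitsCore 10 f (n / 10) [Nat.digitChar (n % 10)]).length
          = (Nat.toDigitsCore 10 f (n / 10) []).length + 1 :=
        Nat.toDigitsCore_lens_eq 10 f (n / 10) _ []
      rw [hlen]
      congr 1
      have hd : pvFmtStep (a * 10 ^ (Nat.toDigitsCore 10 f (n / 10) []).length + n / 10)
          (Nat.digitChar (n % 10))
          = (a * 10 ^ (Nat.toDigitsCore 10 f (n / 10) []).length + n / 10) * 10 + n % 10 := by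
        simp [pvFmtStep, digitChar_val (Nat.mod_lt _ (by norm_num))]
      rw [hd, pow_succ]
      have := Nat.div_add_mod n 10
      ring_nf
      omega

theorem parse_toChars (n : Int) (h : 0 ≤ n) :
    List.foldl pvFmtStep 0 (PySem.Int.toChars n) = n.toNat := by
  unfold PySem.Int.toChars
  rw [if_neg (by omega)]
  unfold Nat.toDigits
  have hlt : n.toNat < 10 ^ (n.toNat + 1) := by
    calc n.toNat < 10 ^ n.toNat := Nat.lt_pow_self (by norm_num)
    _ ≤ 10 ^ (n.toNat + 1) := Nat.pow_le_pow_right (by norm_num) (by omega)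
  rw [tdc_parse _ _ (by omega) hlt]
  simp

-- single-step equations of the format scanner
theorem fmt_nil (nm ab sp : List Char) : pvFormat nm ab sp [] = [] := by simp [pvFormat]

theorem fmt_open (nm ab sp r : List Char) :
    pvFormat nm ab sp ('{' :: '{' :: r) = '{' :: pvFormat nm ab sp r := by
  simp [pvFormat]

theorem fmt_close (nm ab sp r : List Char) :
    pvFormat nm ab sp ('}' :: '}' :: r) = '}' :: pvFormat nm ab sp r := by
  simp [pvFormat]

theorem fmt_lit1 (nm ab sp : List Char) (c : Char) (h1 : c ≠ '{') (h2 : c ≠ '}') (r : List Char) :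
    pvFormat nm ab sp (c :: r) = c :: pvFormat nm ab sp r := by
  cases r with
  | nil => simp [pvFormat, h1, h2]
  | cons d r' => simp [pvFormat, h1, h2]

theorem fmt_field_raw (nm ab sp : List Char) (xs : List Char) (h : xs.head? ≠ some '{') :
    pvFormat nm ab sp ('{' :: xs)
      = pvApplyField (xs.takeWhile (· ≠ '}')) nm ab sp ++
          pvFormat nm ab sp ((xs.dropWhile (· ≠ '}')).drop 1) := by
  cases xs with
  | nil => simp [pvFormat, pvApplyField]
  | cons d r' =>
    have hd : d ≠ '{' := by simpa using h
    simp [pvFormat, hd]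

theorem fmt_lits (nm ab sp : List Char) :
    ∀ (lit rest : List Char), (∀ c ∈ lit, c ≠ '{' ∧ c ≠ '}') →
      pvFormat nm ab sp (lit ++ rest) = lit ++ pvFormat nm ab sp rest := by
  intro lit
  induction lit with
  | nil => simp
  | cons c cs ih =>
    intro rest h
    have hc := h c (by simp)
    rw [List.cons_append, fmt_lit1 nm ab sp c hc.1 hc.2, ih rest (fun c' hc' => h c' (by simp [hc']))]
    rfl

theorem tw_no_stop (field r : List Char) (h : '}' ∉ field) :
    (field ++ '}' :: r).takeWhile (fun x => !decide (x = '}')) = field := by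
  induction field with
  | nil => simp
  | cons c cs ih =>
    simp only [List.mem_cons, not_or] at h
    have hc : c ≠ '}' := fun hh => h.1 hh.symm
    simp [List.takeWhile_cons, hc, ih h.2]

theorem dw_no_stop (field r : List Char) (h : '}' ∉ field) :
    (field ++ '}' :: r).dropWhile (fun x => !decide (x = '}')) = '}' :: r := by
  induction field with
  | nil => simp
  | cons c cs ih =>
    simp only [List.mem_cons, not_or] at h
    have hc : c ≠ '}' := fun hh => h.1 hh.symm
    simp [List.dropWhile_cons, hc, ih h.2]

theorem apply_spacer (nm ab sp : List Char) :
    pvApplyField ['s', 'p', 'a', 'c', 'e', 'r'] nm ab sp = sp := by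
  simp [pvApplyField, lit_spacer, lit_name, lit_abbr, List.takeWhile, List.dropWhile]

theorem apply_abbr (nm ab sp : List Char) :
    pvApplyField ['a', 'b', 'b', 'r'] nm ab sp = ab := by
  simp [pvApplyField, lit_spacer, lit_name, lit_abbr, List.takeWhile, List.dropWhile]

theorem apply_name (nm ab sp ds : List Char) :
    pvApplyField ('n' :: 'a' :: 'm' :: 'e' :: ':' :: '<' :: ds) nm ab sp
      = pvLjust nm (ds.foldl pvFmtStep 0) := by
  simp [pvApplyField, lit_name, List.takeWhile, List.dropWhile]

-- one A-side cell template formats to B's literal cell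
theorem fmt_cell (nm ab sp ca : List Char) (cw : Int) (h1 : '{' ∉ ca) (h2 : '}' ∉ ca)
    (rest : List Char) :
    pvFormat nm ab sp (pvPct ca cw ++ rest) = pvCellB ca sp ab cw ++ pvFormat nm ab sp rest := by
  have hca : ∀ c ∈ ca, c ≠ '{' ∧ c ≠ '}' := by
    intro c hc
    exact ⟨fun h => h1 (h ▸ hc), fun h => h2 (h ▸ hc)⟩
  unfold pvPct pvCellB
  simp only [lit_tmpl, List.cons_append, List.append_assoc, List.nil_append]
  rw [fmt_open, fmt_lits nm ab sp ca _ hca]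
  rw [fmt_field_raw nm ab sp _ (by simp)]
  simp only [List.takeWhile_cons, List.dropWhile_cons, Char.reduceEq, reduceIte,
    decide_not, Bool.not_false, Bool.not_true, decide_false, decide_true, ne_eq, Bool.false_eq_true,
    List.drop_succ_cons, List.drop_zero]
  rw [apply_spacer]
  rw [fmt_field_raw nm ab sp _ (by simp)]
  simp only [List.takeWhile_cons, List.dropWhile_cons, Char.reduceEq, reduceIte,
    decide_not, Bool.not_false, Bool.not_true, decide_false, decide_true, ne_eq, Bool.false_eq_true,
    List.drop_succ_cons, List.drop_zero]
  rw [apply_abbr]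
  rw [fmt_lit1 nm ab sp ':' (by decide) (by decide),
      fmt_lit1 nm ab sp '>' (by decide) (by decide),
      fmt_lits nm ab sp (PySem.Int.toChars cw) _ (toChars_ok cw),
      fmt_close]

-- the joined cell templates format to the joined literal cells
theorem fmt_cells (nm ab sp : List Char) (cw : Int) :
    ∀ (cols : List (String × String)) (rest : List Char),
      (∀ c ∈ cols, '{' ∉ c.2.toList ∧ '}' ∉ c.2.toList) →
      pvFormat nm ab sp
          (PySem.Chars.join "|".toList (cols.map (fun nc => pvPct nc.2.toList cw)) ++ rest)
        = PySem.Chars.join "|".toList (cols.map (fun nc => pvCellB nc.2.toList sp ab cw)) ++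
            pvFormat nm ab sp rest := by
  intro cols
  induction cols with
  | nil => simp [PySem.Chars.join_nil]
  | cons c cs ih =>
    intro rest h
    have hc := h c (by simp)
    have hcs : ∀ c' ∈ cs, '{' ∉ c'.2.toList ∧ '}' ∉ c'.2.toList :=
      fun c' hc' => h c' (by simp [hc'])
    cases cs with
    | nil =>
      simp only [List.map_cons, List.map_nil, PySem.Chars.join_singleton]
      exact fmt_cell nm ab sp c.2.toList cw hc.1 hc.2 rest
    | cons c' cs' =>
      simp only [List.map_cons, PySem.Chars.join_cons_cons, lit_bar]
      rw [List.append_assoc, List.append_assoc]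
      rw [fmt_cell nm ab sp c.2.toList cw hc.1 hc.2]
      rw [List.singleton_append, fmt_lit1 nm ab sp '|' (by decide) (by decide)]
      have := ih rest hcs
      simp only [List.map_cons, lit_bar] at this
      rw [this]
      simp

-- a full data row: row_stub.format(...) equals B's directly-built line
theorem fmt_row (nm ab sp : List Char) (lab cw : Int) (hlab : 0 ≤ lab)
    (cols : List (String × String))
    (hcols : ∀ c ∈ cols, '{' ∉ c.2.toList ∧ '}' ∉ c.2.toList) :
    pvFormat nm ab sp
        (PySem.Chars.join "|".toList
          (('{' :: ("name:<".toList ++ (PySem.Int.toChars lab ++ ['}']))) ::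
            cols.map (fun nc => pvPct nc.2.toList cw)) ++ ['\n'])
      = PySem.Chars.join "|".toList
          (pvLjust nm lab.toNat :: cols.map (fun nc => pvCellB nc.2.toList sp ab cw)) ++ ['\n'] := by
  have hnb : '}' ∉ PySem.Int.toChars lab := fun hmem => (toChars_ok lab '}' hmem).2 rfl
  have hstub : ∀ (tail : List Char),
      pvFormat nm ab sp ('{' :: ("name:<".toList ++ (PySem.Int.toChars lab ++ ['}'])) ++ tail)
        = pvLjust nm lab.toNat ++ pvFormat nm ab sp tail := by
    intro tail
    simp only [lit_namefld, List.cons_append, List.append_assoc, List.nil_append]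
    rw [fmt_field_raw nm ab sp _ (by simp)]
    simp only [List.takeWhile_cons, List.dropWhile_cons, Char.reduceEq, reduceIte,
      decide_not, Bool.not_false, Bool.not_true, decide_false, decide_true, ne_eq,
      Bool.false_eq_true, List.drop_succ_cons, List.drop_zero]
    rw [tw_no_stop _ _ hnb, dw_no_stop _ _ hnb]
    simp only [List.drop_succ_cons, List.drop_zero]
    rw [apply_name, parse_toChars lab hlab]
  cases cols with
  | nil =>
    simp only [List.map_nil, PySem.Chars.join_singleton]
    rw [hstub ['\n'], fmt_lit1 nm ab sp '\n' (by decide) (by decide), fmt_nil]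
  | cons c cs =>
    simp only [List.map_cons, PySem.Chars.join_cons_cons, lit_bar]
    rw [List.append_assoc, List.append_assoc, hstub]
    rw [List.singleton_append, fmt_lit1 nm ab sp '|' (by decide) (by decide)]
    have := fmt_cells nm ab sp cw (c :: cs) ['\n'] hcols
    simp only [List.map_cons, lit_bar] at this
    rw [this]
    rw [fmt_lit1 nm ab sp '\n' (by decide) (by decide), fmt_nil]
    simp

-- loop shapes
theorem foldl_triple {α β γ δ : Type} (f1 : α → β) (f2 : α → γ) (f3 : α → δ) :
    ∀ (xs : List α) (t : List β) (r : List γ) (e : List δ),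
      xs.foldl (fun acc x => (acc.1 ++ [f1 x], acc.2.1 ++ [f2 x], acc.2.2 ++ [f3 x])) (t, r, e)
        = (t ++ xs.map f1, r ++ xs.map f2, e ++ xs.map f3) := by
  intro xs
  induction xs with
  | nil => simp
  | cons x xs ih => intro t r e; simp [ih]

theorem foldl_snoc {α β : Type} (h : α → β) :
    ∀ (xs : List α) (init : List β),
      xs.foldl (fun t x => t ++ [h x]) init = init ++ xs.map h := by
  intro xs
  induction xs with
  | nil => simp
  | cons x xs ih => intro init; simp [ih]



theorem pv_witness_ok : Dom_make_raw_table_stub (pvWitness_make_raw_table_stub.1) (pvWitness_make_raw_table_stub.2.1) (pvWitness_make_raw_table_stub.2.2.1) (pvWitness_make_raw_table_stub.2.2.2.1) (pvWitness_make_raw_table_stub.2.2.2.2) ∧ Pre_make_raw_table_stub (pvWitness_make_raw_table_stub.1) (pvWitness_make_raw_table_stub.2.1) (pvWitness_make_raw_table_stub.2.2.1) (pvWitness_make_raw_table_stub.2.2.2.1) (pvWitness_make_raw_table_stub.2.2.2.2) := by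
  decide

-- ===== VERDICT (by name: the statement is the Claim_ definition above) =====
theorem make_raw_table_stub_spec : Claim_equal_make_raw_table_stub := by
  intro columns rows spacer lab_width cell_width _ hpre
  unfold Spec_make_raw_table_stub
  simp only [make_raw_table_stub, make_raw_table_stub_alt]
  rw [foldl_triple, foldl_snoc, foldl_snoc]
  apply congrArg String.ofList
  apply congrArg (PySem.Chars.join [])
  apply congrArg₂ _ (by simp) ?_
  rcases hpre with hnone | ⟨hlab, hcols⟩
  · apply List.map_congr_left
    intro r hr
    rw [hnone r hr]
    simp [pvRowOutA, pvRowOutB]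
  · apply List.map_congr_left
    intro r _
    match r with
    | none => simp [pvRowOutA, pvRowOutB]
    | some (nm, ab) =>
      show pvFormat nm.toList ab.toList spacer.toList _ = _
      simp only [List.singleton_append]
      exact fmt_row nm.toList ab.toList spacer.toList lab_width cell_width hlab columns hcols
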